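-- pv_equiv track=rewrite | github.com/VisakanMathy/Tetriling-Algorithm | main.py | createLabeledTarget
-- ===== SOURCE A (Python) =====
-- import copy
--
-- def createLabeledTarget(target):
--     labeledTarget = copy.deepcopy(target)
--     counter = 1
--     numberOfRows = len(target)
--     numberOfColumns = len(target[0])
--     for i in range(numberOfColumns):
--         for j in range(numberOfRows):
--             if labeledTarget[j][i] == 1:
--                 labeledTarget[j][i] = counter
--             counter += 1
--     return labeledTarget
-- ===== SOURCE B (Python) =====
-- def createLabeledTarget(target):
--     height = len(target)
--     width = len(target[0])
--     result = []
--     for j, row in enumerate(target):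
--         newRow = list(row)
--         for i, label in enumerate(range(j + 1, j + 1 + width * height, height)):
--             if newRow[i] == 1:
--                 newRow[i] = label
--         result.append(newRow)
--     return result
-- ===== Notes on version B (the rewrite author's own statement) =====
-- stated objective: simpler
-- what changed: B drops A's deepcopy, column-major traversal and running counter: it makes one row-major pass that builds each output row fresh, drawing that row's labels from the arithmetic progression range(j+1, j+1+width*height, height) instead of counting cells.
import Mathlib
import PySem

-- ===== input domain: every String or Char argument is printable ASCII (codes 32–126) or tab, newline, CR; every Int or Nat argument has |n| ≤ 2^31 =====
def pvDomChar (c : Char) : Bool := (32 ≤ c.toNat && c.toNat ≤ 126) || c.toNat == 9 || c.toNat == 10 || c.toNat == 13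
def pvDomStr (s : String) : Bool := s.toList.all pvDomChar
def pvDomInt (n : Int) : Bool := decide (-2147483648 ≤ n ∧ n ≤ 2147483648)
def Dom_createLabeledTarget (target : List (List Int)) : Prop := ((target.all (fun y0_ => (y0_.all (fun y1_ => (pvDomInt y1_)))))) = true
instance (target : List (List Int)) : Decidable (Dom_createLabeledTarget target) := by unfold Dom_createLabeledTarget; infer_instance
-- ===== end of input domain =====

-- B replaces A's deepcopy + column-major mutation + running counter by a row-major pass
-- that builds fresh rows and draws each row's labels from an arithmetic progression
-- range(j+1, j+1+width*height, height) (objective: simpler; same asymptotic cost).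

-- ===== PORT A =====
-- one step of A's inner loop: read labeledTarget[j][i], relabel if it equals 1, bump counter
def pvStepA (i : Int) (st : List (List Int) × Int) (j : Int) : List (List Int) × Int :=
  let grid := st.1
  let g' : List (List Int) :=
    match PySem.List.pyGet? grid j with
    | some row =>
      match PySem.List.pyGet? row i with
      | some v => if v = 1 then grid.set j.natAbs (row.set i.natAbs st.2) else grid
      | none => grid   -- IndexError in Python; excluded by Pre_
    | none => grid
  (g', st.2 + 1)

def createLabeledTarget (target : List (List Int)) : List (List Int) :=
  -- labeledTarget = copy.deepcopy(target)
  let numberOfRows : Int := (target.length : Int)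
  let numberOfColumns : Int := ((target.headD []).length : Int)  -- len(target[0]); IndexError on [] excluded by Pre_
  ((PySem.List.pyRange 0 numberOfColumns 1).foldl
    (fun st i => (PySem.List.pyRange 0 numberOfRows 1).foldl (pvStepA i) st)
    (target, (1 : Int))).1

-- ===== PORT B =====
-- one step of B's inner loop: if newRow[i] == 1, set newRow[i] to the drawn label
def pvStepB (newRow : List Int) (il : Int × Int) : List Int :=
  match PySem.List.pyGet? newRow il.1 with
  | some v => if v = 1 then newRow.set il.1.natAbs il.2 else newRow
  | none => newRow   -- IndexError in Python; excluded by Pre_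

def createLabeledTarget_alt (target : List (List Int)) : List (List Int) :=
  let height : Int := (target.length : Int)
  let width : Int := ((target.headD []).length : Int)  -- len(target[0]); IndexError on [] excluded by Pre_
  (PySem.List.enumerate target).map (fun jr =>
    (PySem.List.enumerate
        (PySem.List.pyRange (jr.1 + 1) (jr.1 + 1 + width * height) height)).foldl
      pvStepB jr.2)

-- ===== PRECONDITION & SPEC =====
-- Python A raises IndexError on the empty grid (target[0]) and on grids where some row is
-- shorter than row 0 (labeledTarget[j][i] out of range); exactly those inputs are excluded.
def Pre_createLabeledTarget (target : List (List Int)) : Prop :=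
  target ≠ [] ∧ ∀ row ∈ target, (target.headD []).length ≤ row.length
instance (target : List (List Int)) : Decidable (Pre_createLabeledTarget target) := by
  unfold Pre_createLabeledTarget; infer_instance
def pvWitness_createLabeledTarget : List (List Int) := [[1, 0], [2, 1]]

def Spec_createLabeledTarget (target : List (List Int)) (out : List (List Int)) : Prop :=
  out = createLabeledTarget_alt target
instance (target : List (List Int)) (out : List (List Int)) : Decidable (Spec_createLabeledTarget target out) := by
  unfold Spec_createLabeledTarget; infer_instance

-- ===== CLAIM (what is proved, stated in full; the proofs are below) =====
def Claim_equal_createLabeledTarget : Prop := ∀ (target : List (List Int)), Dom_createLabeledTarget target → Pre_createLabeledTarget target → Spec_createLabeledTarget target (createLabeledTarget target)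

-- ===== LEMMAS AND PROOFS =====

-- the effect of one relabeling step on a single row (shared characterisation of both loops)
def pvRowUpd (i lab : Int) (row : List Int) : List Int :=
  match PySem.List.pyGet? row i with
  | some v => if v = 1 then row.set i.natAbs lab else row
  | none => row

-- serial effect of columns 0..m-1 of the labeling on row j of an R-row grid
def pvSerial (R : Nat) (j : Nat) : Nat → List Int → List Int
  | 0, row => row
  | (m+1), row => pvRowUpd (m : Int) ((m : Int) * R + j + 1) (pvSerial R j m row)

theorem pvMapIdx_congr {α β : Type} (xs : List α) (f g : Nat → α → β)
    (h : ∀ (j : Nat) (hj : j < xs.length), f j xs[j] = g j xs[j]) :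
    xs.mapIdx f = xs.mapIdx g := by
  apply List.ext_getElem <;> simp [List.getElem_mapIdx]
  intro i h1 h2; exact h i (by simpa using h1)

theorem pvMap_enumerate {α β : Type} (f : Int × α → β) (xs : List α) (s : Int) :
    (PySem.List.enumerate xs s).map f = xs.mapIdx (fun k x => f (s + (k : Int), x)) := by
  induction xs generalizing s with
  | nil => simp [PySem.List.enumerate_nil]
  | cons x xs ih =>
    rw [PySem.List.enumerate_cons, List.map_cons, ih (s+1), List.mapIdx_cons]
    congr 1
    · norm_num
    · apply pvMapIdx_congr; intro k hk; congr 2; push_cast; ring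

theorem pvInnerA (i : Int) (g : List (List Int)) (c : Int) (n : Nat) (hn : n ≤ g.length) :
    (PySem.List.pyRange 0 (n : Int) 1).foldl (pvStepA i) (g, c) =
    (g.mapIdx (fun j row => if j < n then pvRowUpd i (c + (j : Int)) row else row), c + n) := by
  induction n with
  | zero =>
    rw [show PySem.List.pyRange 0 (((0:Nat)):Int) 1 = [] from
      PySem.List.pyRange_one_eq_nil (by norm_num)]
    simp only [List.foldl_nil, Nat.cast_zero, add_zero]
    congr 1
    apply List.ext_getElem
    · simp
    · intro k h1 h2; simp [List.getElem_mapIdx]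
  | succ n ih =>
    have hn' : n ≤ g.length := by omega
    have hgn : n < g.length := by omega
    have hsplit : PySem.List.pyRange 0 ((n + 1 : Nat) : Int) 1 =
        PySem.List.pyRange 0 (n : Int) 1 ++ [(n : Int)] := by
      push_cast
      exact PySem.List.pyRange_one_succ_right (by positivity)
    rw [hsplit, List.foldl_append, ih hn', List.foldl_cons, List.foldl_nil]
    set G := g.mapIdx (fun j row => if j < n then pvRowUpd i (c + (j : Int)) row else row) with hG
    have hlenG : G.length = g.length := by simp [hG]
    have hnG : n < G.length := by omega
    have hgetG : G[n] = g[n] := by simp [hG, List.getElem_mapIdx]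
    have hread : PySem.List.pyGet? G (n : Int) = some g[n] := by
      rw [PySem.List.pyGet?_natCast, List.getElem?_eq_getElem hnG, hgetG]
    have hstep : pvStepA i (G, c + (n : Int)) (n : Int) =
        (G.set n (pvRowUpd i (c + (n : Int)) g[n]), c + (n : Int) + 1) := by
      simp only [pvStepA, hread, pvRowUpd, Int.natAbs_natCast]
      rcases hrow : PySem.List.pyGet? (g[n]) i with _ | v
      · simp [List.set_getElem_self, hgetG.symm]
      · by_cases hv : v = 1
        · simp [hv]
        · simp [hv, List.set_getElem_self, hgetG.symm]
    rw [hstep]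
    congr 1
    · apply List.ext_getElem
      · simp [hG]
      · intro k h1 h2
        simp only [List.getElem_set, hG, List.getElem_mapIdx]
        rcases eq_or_ne k n with rfl | hne
        · rw [if_pos rfl, if_pos (by omega)]
        · rw [if_neg (by omega)]
          by_cases hk : k < n
          · simp [hk, show k < n + 1 by omega]
          · simp [hk, show ¬ (k < n + 1) by omega]
    · push_cast; ring

theorem pvOuterA (g : List (List Int)) (m : Nat) :
    (PySem.List.pyRange 0 (m : Int) 1).foldl
      (fun st i => (PySem.List.pyRange 0 (g.length : Int) 1).foldl (pvStepA i) st) (g, 1) =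
    (g.mapIdx (fun j row => pvSerial g.length j m row), 1 + (m : Int) * g.length) := by
  induction m with
  | zero =>
    rw [show PySem.List.pyRange 0 (((0:Nat)):Int) 1 = [] from
      PySem.List.pyRange_one_eq_nil (by norm_num)]
    simp only [List.foldl_nil, Nat.cast_zero, zero_mul, add_zero]
    congr 1
    apply List.ext_getElem
    · simp
    · intro k h1 h2; simp [List.getElem_mapIdx, pvSerial]
  | succ m ih =>
    have hsplit : PySem.List.pyRange 0 ((m + 1 : Nat) : Int) 1 =
        PySem.List.pyRange 0 (m : Int) 1 ++ [(m : Int)] := by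
      push_cast
      exact PySem.List.pyRange_one_succ_right (by positivity)
    rw [hsplit, List.foldl_append, ih, List.foldl_cons, List.foldl_nil]
    set G := g.mapIdx (fun j row => pvSerial g.length j m row) with hG
    have hlenG : G.length = g.length := by simp [hG]
    rw [show (g.length : Int) = ((g.length : Nat) : Int) from rfl,
        pvInnerA (m : Int) G (1 + (m : Int) * g.length) g.length (by omega)]
    congr 1
    · rw [hG, List.mapIdx_mapIdx]
      apply pvMapIdx_congr
      intro k hk
      simp only [hk, if_pos]
      show pvRowUpd (m : Int) (1 + (m : Int) * g.length + (k : Int)) (pvSerial g.length k m g[k]) =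
        pvSerial g.length k (m + 1) g[k]
      rw [pvSerial]
      congr 1
      ring
    · push_cast; ring

-- B's label range is the arithmetic progression a, a+R, …, a+(C-1)R
theorem pvRange_count (a : Int) (R C : Nat) (hR : 0 < R) :
    PySem.List.pyRange a (a + (C : Int) * (R : Int)) (R : Int) =
    (List.range C).map (fun (k : Nat) => a + (R : Int) * (k : Int)) := by
  have hRZ : (0 : Int) < (R : Int) := by exact_mod_cast hR
  have hcount : (if a < a + (C : Int) * (R : Int)
      then ((a + (C : Int) * (R : Int) - a + (R : Int) - 1) / (R : Int)).toNat else 0) = C := by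
    rcases Nat.eq_zero_or_pos C with h0 | hC
    · subst h0; simp
    · have hCZ : (0 : Int) < (C : Int) := by exact_mod_cast hC
      have hlt : a < a + (C : Int) * (R : Int) := by nlinarith
      rw [if_pos hlt]
      have harith : a + (C : Int) * (R : Int) - a + (R : Int) - 1 =
          ((R : Int) - 1) + (C : Int) * (R : Int) := by ring
      rw [harith, Int.add_mul_ediv_right _ _ (by omega : (R : Int) ≠ 0),
          Int.ediv_eq_zero_of_lt (by omega) (by omega), zero_add, Int.toNat_natCast]
  rw [PySem.List.pyRange_of_pos _ _ hRZ, hcount]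

-- B's per-row fold over the enumerated progression is the serial relabeling of that row
theorem pvBrow (R j : Nat) (row : List Int) (C : Nat) :
    (PySem.List.enumerate
        ((List.range C).map (fun (k : Nat) => ((j : Int) + 1) + (R : Int) * (k : Int))) 0).foldl
      pvStepB row = pvSerial R j C row := by
  induction C with
  | zero => simp [PySem.List.enumerate_nil, pvSerial]
  | succ C ih =>
    rw [List.range_succ, List.map_append, PySem.List.enumerate_append, List.foldl_append, ih]
    simp only [List.map_cons, List.map_nil, PySem.List.enumerate_cons,
      PySem.List.enumerate_nil, List.foldl_cons, List.foldl_nil,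
      List.length_map, List.length_range]
    show pvRowUpd (0 + (C : Int)) ((j : Int) + 1 + (R : Int) * (C : Int))
        (pvSerial R j C row) = pvSerial R j (C + 1) row
    rw [pvSerial, show (0 + (C : Int)) = (C : Int) by ring,
        show ((j : Int) + 1 + (R : Int) * (C : Int)) = ((C : Int) * R + j + 1) by ring]

-- ===== VERDICT (by name: the statement is the Claim_ definition above) =====
theorem createLabeledTarget_spec : Claim_equal_createLabeledTarget := by
  intro target hdom hpre
  unfold Spec_createLabeledTarget
  obtain ⟨hne, -⟩ := hpre
  have hR : 0 < target.length := List.length_pos_of_ne_nil hne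
  simp only [createLabeledTarget, createLabeledTarget_alt]
  rw [pvOuterA target ((target.headD []).length), pvMap_enumerate]
  apply pvMapIdx_congr
  intro j hj
  symm
  show (PySem.List.enumerate
      (PySem.List.pyRange ((0 : Int) + (j : Int) + 1)
        ((0 : Int) + (j : Int) + 1 + ((target.headD []).length : Int) * (target.length : Int))
        (target.length : Int)) 0).foldl pvStepB target[j] =
    pvSerial target.length j ((target.headD []).length) target[j]
  rw [show ((0 : Int) + (j : Int) + 1) = ((j : Int) + 1) by ring,
      pvRange_count ((j : Int) + 1) target.length ((target.headD []).length) hR]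
  exact pvBrow target.length j target[j] ((target.headD []).length)
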